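-- pv_equiv track=rewrite | github.com/slauger/espresso-macos | espresso/screen_monitor.py | _filter_notification_text
-- ===== SOURCE A (Python) =====
-- def _filter_notification_text(lines: list) -> str:
--     """
--     Filter OCR text to extract only sender and message.
--
--     Args:
--         lines: List of text lines from OCR
--
--     Returns:
--         Filtered text with sender and message
--     """
--     if not lines:
--         return ""
--
--     # Filter out common UI elements
--     ignore_keywords = [
--         'Microsoft Teams',
--         'Schnelle Antwort senden',
--         'Online mit Microsoft Exchange',
--         'len',
--         'SL',
--         '100 %',
--         '+',
--     ]
--
--     filtered_lines = []
--     found_sender = False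
--
--     for line in lines:
--         # Skip lines with ignore keywords
--         if any(keyword in line for keyword in ignore_keywords):
--             continue
--
--         # Skip time patterns (HH:MM or DD.MM.YYYY)
--         if ':' in line and len(line) < 10:  # Like "15:16"
--             continue
--         if '.' in line and line.replace('.', '').replace(' ', '').isdigit():  # Like "08.01.2026"
--             continue
--
--         # Look for sender pattern: (Gast) Name or just Name
--         if '(' in line and ')' in line:
--             found_sender = True
--             filtered_lines.append(line)
--         elif found_sender:
--             # This is likely the message after the sender
--             filtered_lines.append(line)
--             break  # Only take sender + first message line
--
--     # Return sender and message
--     return " | ".join(filtered_lines) if filtered_lines else " | ".join(lines[:2])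
-- ===== SOURCE B (Python) =====
-- def _filter_notification_text(lines: list) -> str:
--     """Filter OCR text to extract sender and message (drop / run-length / slice version)."""
--     ignore_keywords = [
--         'Microsoft Teams',
--         'Schnelle Antwort senden',
--         'Online mit Microsoft Exchange',
--         'len',
--         'SL',
--         '100 %',
--         '+',
--     ]
--
--     def _keep(line):
--         return (not any(k in line for k in ignore_keywords)
--                 and not (':' in line and len(line) < 10)
--                 and not ('.' in line and line.replace('.', '').replace(' ', '').isdigit()))
--
--     def _is_sender(line):
--         return '(' in line and ')' in line
--
--     survivors = [l for l in lines if _keep(l)]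
--
--     # drop survivors before the first sender line
--     i = 0
--     while i < len(survivors) and not _is_sender(survivors[i]):
--         i += 1
--     tail = survivors[i:]
--
--     if tail:
--         # length of the leading run of sender lines
--         n = 0
--         while n < len(tail) and _is_sender(tail[n]):
--             n += 1
--         picked = tail[:n + 1]  # the sender run plus the first message line, if any
--     else:
--         picked = []
--
--     return " | ".join(picked) if picked else " | ".join(lines[:2])
-- ===== Notes on version B (the rewrite author's own statement) =====
-- stated objective: alternative
-- what changed: A's single stateful loop (found_sender flag, append, break) is replaced by a characterization of the result as a contiguous slice: filter survivors, drop those before the first '(...)' sender line, measure the leading run of sender lines, and slice off that run plus one following message line; no flag, no break.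
import Mathlib
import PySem

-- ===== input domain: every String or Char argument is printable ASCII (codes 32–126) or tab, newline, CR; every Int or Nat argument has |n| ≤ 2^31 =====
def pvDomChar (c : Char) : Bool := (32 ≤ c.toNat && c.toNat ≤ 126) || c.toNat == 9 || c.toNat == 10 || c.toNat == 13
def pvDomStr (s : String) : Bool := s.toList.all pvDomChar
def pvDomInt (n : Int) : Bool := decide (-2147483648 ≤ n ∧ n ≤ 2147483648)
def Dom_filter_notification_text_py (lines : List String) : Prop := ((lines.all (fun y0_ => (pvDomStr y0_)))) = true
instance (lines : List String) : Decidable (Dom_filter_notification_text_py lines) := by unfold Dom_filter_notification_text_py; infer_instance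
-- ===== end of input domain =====

-- B replaces A's stateful loop by filter + drop-to-first-sender + leading-run slice; same values, no speed claim.

-- ===== PORT A =====
def pvIgnoreKeywordsA : List String :=
  ["Microsoft Teams", "Schnelle Antwort senden", "Online mit Microsoft Exchange",
   "len", "SL", "100 %", "+"]

-- A's single loop, carrying found_sender and the filtered_lines accumulator.
def pvLoopA : List String → Bool → List String → List String
  | [], _, acc => acc
  | l :: rest, fs, acc =>
    if pvIgnoreKeywordsA.any (fun k => PySem.Str.isIn k l) then pvLoopA rest fs acc
    else if PySem.Str.isIn ":" l && decide (PySem.Str.len l < 10) then pvLoopA rest fs acc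
    else if PySem.Str.isIn "." l &&
            PySem.Str.strIsdigit (PySem.Str.replace (PySem.Str.replace l "." "") " " "") then
      pvLoopA rest fs acc
    else if PySem.Str.isIn "(" l && PySem.Str.isIn ")" l then pvLoopA rest true (acc ++ [l])
    else if fs then acc ++ [l]      -- append then break
    else pvLoopA rest fs acc

def filter_notification_text_py (lines : List String) : String :=
  if lines = [] then ""
  else
    let filtered := pvLoopA lines false []
    if filtered ≠ [] then PySem.Str.join " | " filtered
    else PySem.Str.join " | " (PySem.List.slice lines none (some 2))

-- ===== PORT B =====
-- Source B's _keep: one boolean conjunction of the three negated skip tests.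
def pvKeep (l : String) : Bool :=
  !(pvIgnoreKeywordsA.any (fun k => PySem.Str.isIn k l))
  && !(PySem.Str.isIn ":" l && decide (PySem.Str.len l < 10))
  && !(PySem.Str.isIn "." l &&
       PySem.Str.strIsdigit (PySem.Str.replace (PySem.Str.replace l "." "") " " ""))

def pvIsSender (l : String) : Bool := PySem.Str.isIn "(" l && PySem.Str.isIn ")" l

-- Source B's first while loop (index scan): drop survivors before the first sender line.
def pvDropNonSenders : List String → List String
  | [] => []
  | l :: rest => if pvIsSender l then l :: rest else pvDropNonSenders rest

-- Source B's second while loop: length of the leading run of sender lines.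
def pvSenderRun : List String → Nat
  | [] => 0
  | l :: rest => if pvIsSender l then pvSenderRun rest + 1 else 0

def filter_notification_text_py_alt (lines : List String) : String :=
  let survivors := lines.filter pvKeep
  let tail := pvDropNonSenders survivors
  let picked := if tail = [] then [] else tail.take (pvSenderRun tail + 1)
  if picked ≠ [] then PySem.Str.join " | " picked
  else PySem.Str.join " | " (PySem.List.slice lines none (some 2))

-- ===== PRECONDITION & SPEC =====
def Spec_filter_notification_text_py (lines : List String) (out : String) : Prop := out = filter_notification_text_py_alt lines
instance (lines : List String) (out : String) : Decidable (Spec_filter_notification_text_py lines out) := by unfold Spec_filter_notification_text_py; infer_instance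

-- ===== CLAIM =====
def Claim_equal_filter_notification_text_py : Prop := ∀ (lines : List String), Dom_filter_notification_text_py lines → Spec_filter_notification_text_py lines (filter_notification_text_py lines)

-- ===== LEMMAS AND PROOFS =====

-- Proof-only intermediate: A's loop body on the survivors (the state machine B no longer has).
def pvExtract : List String → Bool → List String
  | [], _ => []
  | l :: rest, fs =>
    if pvIsSender l then l :: pvExtract rest true
    else if fs then [l]
    else pvExtract rest fs

-- A line B's filter drops is exactly one A's loop skips.
theorem pvLoopA_skip (l : String) (h : pvKeep l = false) (rest : List String)
    (fs : Bool) (acc : List String) :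
    pvLoopA (l :: rest) fs acc = pvLoopA rest fs acc := by
  simp only [pvLoopA]
  by_cases h1 : pvIgnoreKeywordsA.any (fun k => PySem.Str.isIn k l)
  · rw [if_pos h1]
  by_cases h2 : PySem.Str.isIn ":" l && decide (PySem.Str.len l < 10)
  · rw [if_neg h1, if_pos h2]
  by_cases h3 : PySem.Str.isIn "." l &&
      PySem.Str.strIsdigit (PySem.Str.replace (PySem.Str.replace l "." "") " " "")
  · rw [if_neg h1, if_neg h2, if_pos h3]
  · exfalso
    rw [Bool.not_eq_true] at h1 h2 h3
    have hk : pvKeep l = true := by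
      unfold pvKeep
      rw [h1, h2, h3]
      rfl
    rw [hk] at h
    simp at h

-- A line B's filter keeps passes all three of A's skip tests.
theorem pvKeep_true_cases (l : String) (h : pvKeep l = true) :
    (pvIgnoreKeywordsA.any (fun k => PySem.Str.isIn k l)) = false
    ∧ (PySem.Str.isIn ":" l && decide (PySem.Str.len l < 10)) = false
    ∧ (PySem.Str.isIn "." l &&
        PySem.Str.strIsdigit (PySem.Str.replace (PySem.Str.replace l "." "") " " "")) = false := by
  unfold pvKeep at h
  simp only [Bool.and_eq_true, Bool.not_eq_true'] at h
  exact ⟨h.1.1, h.1.2, h.2⟩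

-- A's interleaved loop equals the extraction state machine over the filtered survivors.
theorem pvLoopA_eq_extract_filter (lines : List String) :
    ∀ (fs : Bool) (acc : List String),
      pvLoopA lines fs acc = acc ++ pvExtract (lines.filter pvKeep) fs := by
  induction lines with
  | nil => intro fs acc; simp [pvLoopA, pvExtract]
  | cons l rest ih =>
    intro fs acc
    rw [List.filter_cons]
    by_cases hk : pvKeep l
    · obtain ⟨h1, h2, h3⟩ := pvKeep_true_cases l hk
      rw [if_pos hk]
      show pvLoopA (l :: rest) fs acc = _
      unfold pvLoopA
      simp only [h1, h2, h3, Bool.false_eq_true, if_false, pvExtract, pvIsSender]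
      split_ifs with hs hf
      · rw [ih]; simp
      · simp
      · exact ih fs acc
    · rw [if_neg hk, pvLoopA_skip l (by simpa using hk)]
      exact ih fs acc

-- With the flag set, the state machine takes the leading sender run plus one line.
theorem pvExtract_true_eq_take (xs : List String) :
    pvExtract xs true = xs.take (pvSenderRun xs + 1) := by
  induction xs with
  | nil => simp [pvExtract, pvSenderRun]
  | cons x t ih =>
    unfold pvExtract pvSenderRun
    by_cases hx : pvIsSender x
    · simp [hx, ih, List.take_succ_cons]
    · simp [hx]

-- The state machine from the initial state equals B's drop/run/slice pipeline.
theorem pvExtract_eq_pipeline (xs : List String) :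
    pvExtract xs false =
      (if pvDropNonSenders xs = [] then []
       else (pvDropNonSenders xs).take (pvSenderRun (pvDropNonSenders xs) + 1)) := by
  induction xs with
  | nil => simp [pvExtract, pvDropNonSenders]
  | cons x t ih =>
    unfold pvExtract pvDropNonSenders
    by_cases hx : pvIsSender x
    · simp [hx, pvSenderRun, pvExtract_true_eq_take, List.take_succ_cons]
    · simpa [hx] using ih

-- ===== VERDICT =====
theorem filter_notification_text_py_spec : Claim_equal_filter_notification_text_py := by
  intro lines _
  unfold Spec_filter_notification_text_py filter_notification_text_py filter_notification_text_py_alt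
  cases lines with
  | nil => decide
  | cons l rest =>
    simp only [pvLoopA_eq_extract_filter, List.nil_append, List.cons_ne_nil, if_false,
      pvExtract_eq_pipeline]
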